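-- pv_equiv track=rewrite | github.com/HttpTesting/pyhttp | httptesting/library/parse.py | parse_output_parameters
-- ===== SOURCE A (Python) =====
-- def parse_output_parameters(params):
--     """
--     Parse the test case output parameters.
--
--     Args:
--         params: res[0].tr.id
--     Example:
--         ret = parse_output_parameters('result.res.data[0].id')
--         e.g. Data.tr.id => Data['tr']['id']
--              res.tr.id => res['tr]['id]
--              res[0].tr.id => res[0]['tr']['id']
--              cookie.SESSION => cookie['SESSION']
--              headers.Content-Type => headers['Content-Type']
--     """
--     param_list = params.split(".")
--
--     # Interception object.
--     param_obj = param_list[0]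
--     param_list.pop(0)
--
--     # Template string.
--     template = "['{}']"
--     parse_string = ''
--     # Parse the test case output parameters.
--     for args in param_list:
--         if "[" in args:
--             left_string = ''
--             for num, val in enumerate(args.split("[")):
--                 if num == 0:
--                     val = "['{}']".format(val)
--                 left_string = left_string + val + "["
--             left_string = (left_string[:-1])
--             parse_string = parse_string + left_string
--         else:
--             parse_string = parse_string + template.format(args)
--     ret_string = param_obj.lower() + parse_string
--     return ret_string
-- ===== SOURCE B (Python) =====
-- def parse_output_parameters(params):
--     head, *rest = params.split(".")
--     return head.lower() + "".join(
--         "['{}']{}{}".format(*seg.partition("[")) for seg in rest)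
-- ===== Notes on version B (the rewrite author's own statement) =====
-- stated objective: simpler
-- what changed: A's inner split('[')/enumerate/rebuild-and-trim loop per segment is replaced by a single partition at the first '[': wrap the leading name in ['...'] and append the bracket tail verbatim, joined in one pass.
import Mathlib
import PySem

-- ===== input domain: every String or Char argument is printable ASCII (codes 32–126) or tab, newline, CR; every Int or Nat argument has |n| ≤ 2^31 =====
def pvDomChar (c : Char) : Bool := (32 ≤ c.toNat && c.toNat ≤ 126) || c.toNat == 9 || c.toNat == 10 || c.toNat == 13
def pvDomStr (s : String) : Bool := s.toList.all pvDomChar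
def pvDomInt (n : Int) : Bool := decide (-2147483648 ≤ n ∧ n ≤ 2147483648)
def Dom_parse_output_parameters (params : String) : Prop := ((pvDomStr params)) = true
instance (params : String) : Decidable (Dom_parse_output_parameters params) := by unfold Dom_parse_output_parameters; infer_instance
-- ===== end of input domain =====

-- B replaces A's inner split('[')/enumerate/rebuild loop by one partition at the first '[' per segment (objective: simpler).

-- ===== PORT A =====
def parse_output_parameters (params : String) : String :=
  let param_list := PySem.Chars.splitOn params.toList ['.']
  -- param_list[0] and pop(0): split never returns an empty list, so headD/tail are the exact values
  let param_obj := param_list.headD []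
  let param_list := param_list.tail
  let parse_string := param_list.foldl (fun parse_string args =>
    if PySem.Chars.isIn ['['] args then
      let left_string := (PySem.List.enumerate (PySem.Chars.splitOn args ['[']) 0).foldl
        (fun left_string p =>
          let val := if p.1 == 0 then '[' :: '\'' :: p.2 ++ ['\'', ']'] else p.2
          left_string ++ val ++ ['[']) []
      let left_string := PySem.Chars.slice left_string none (some (-1))
      parse_string ++ left_string
    else
      parse_string ++ ('[' :: '\'' :: args ++ ['\'', ']'])) []
  String.ofList (PySem.Chars.lower param_obj ++ parse_string)

-- ===== PORT B =====
def parse_output_parameters_alt (params : String) : String :=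
  let parts := PySem.Chars.splitOn params.toList ['.']
  let head := PySem.Chars.lower (parts.headD [])
  String.ofList (parts.tail.foldl (fun acc seg =>
    -- seg.partition("["): name = part before the first '[', tail = '[' and everything after (or "" if absent)
    let name := seg.takeWhile (· != '[')
    let tail := seg.dropWhile (· != '[')
    acc ++ (('[' :: '\'' :: name ++ ['\'', ']']) ++ tail)) head)

-- ===== PRECONDITION & SPEC =====
def Spec_parse_output_parameters (params : String) (out : String) : Prop := out = parse_output_parameters_alt params
instance (params : String) (out : String) : Decidable (Spec_parse_output_parameters params out) := by unfold Spec_parse_output_parameters; infer_instance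

-- ===== CLAIM (what is proved, stated in full; the proofs are below) =====
def Claim_equal_parse_output_parameters : Prop := ∀ (params : String), Dom_parse_output_parameters params → Spec_parse_output_parameters params (parse_output_parameters params)

-- ===== LEMMAS AND PROOFS =====

-- A pure structural model of Python's str.split on a single-character separator.
def mySplit (c : Char) : List Char → List (List Char)
  | [] => [[]]
  | x :: t => if x = c then [] :: mySplit c t else (mySplit c t).modifyHead (x :: ·)

theorem mySplit_ne_nil (c : Char) (s : List Char) : mySplit c s ≠ [] := by
  induction s with
  | nil => simp [mySplit]
  | cons x t ih =>
    simp only [mySplit]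
    split_ifs
    · simp
    · cases h : mySplit c t with
      | nil => exact absurd h ih
      | cons a l => simp

theorem splitOn_go_eq (c : Char) (fuel : Nat) (l cur : List Char) (acc : List (List Char))
    (h : l.length ≤ fuel) :
    PySem.Chars.splitOn.go [c] fuel l cur acc
      = acc.reverse ++ (mySplit c l).modifyHead (cur.reverse ++ ·) := by
  induction fuel generalizing l cur acc with
  | zero =>
    have : l = [] := List.length_eq_zero_iff.mp (Nat.le_zero.mp h)
    subst this
    simp [PySem.Chars.splitOn.go, mySplit]
  | succ n ih =>
    cases l with
    | nil => simp [PySem.Chars.splitOn.go, mySplit]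
    | cons x t =>
      simp only [PySem.Chars.splitOn.go]
      by_cases hx : x = c
      · subst hx
        rw [if_pos (by simp [List.isPrefixOf])]
        simp only [List.length_cons, List.length_nil, Nat.zero_add, List.drop_succ_cons, List.drop_zero]
        rw [ih t [] (cur.reverse :: acc) (by simpa using Nat.le_of_succ_le_succ h)]
        simp [mySplit]
        cases mySplit x t <;> simp
      · rw [if_neg (by simp [List.isPrefixOf]; exact fun hc => hx hc.symm)]
        rw [ih t (x :: cur) acc (by simpa using Nat.le_of_succ_le_succ h)]
        cases hm : mySplit c t with
        | nil => exact absurd hm (mySplit_ne_nil c t)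
        | cons a m => simp [mySplit, if_neg hx, hm]

theorem splitOn_single (c : Char) (s : List Char) :
    PySem.Chars.splitOn s [c] = mySplit c s := by
  unfold PySem.Chars.splitOn
  rw [splitOn_go_eq c (s.length + 1) s [] [] (by omega)]
  cases hm : mySplit c s with
  | nil => exact absurd hm (mySplit_ne_nil c s)
  | cons a m => simp

theorem mySplit_headD (c : Char) (s : List Char) :
    (mySplit c s).headD [] = s.takeWhile (· != c) := by
  induction s with
  | nil => simp [mySplit]
  | cons x t ih =>
    by_cases hx : x = c
    · simp [mySplit, hx]
    · cases hm : mySplit c t with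
      | nil => exact absurd hm (mySplit_ne_nil c t)
      | cons a m =>
        rw [hm] at ih
        simp only [List.headD] at ih
        simp [mySplit, hm, bne, hx, ih]

theorem mySplit_flatMap (c : Char) (s : List Char) :
    (mySplit c s).flatMap (fun p => c :: p) = c :: s := by
  induction s with
  | nil => simp [mySplit]
  | cons x t ih =>
    simp only [mySplit]
    by_cases hx : x = c
    · simp [hx, ih]
    · cases hm : mySplit c t with
      | nil => exact absurd hm (mySplit_ne_nil c t)
      | cons a m =>
        rw [if_neg hx]
        simp only [hm] at ih ⊢
        simp only [List.modifyHead, List.flatMap_cons] at ih ⊢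
        have : a ++ m.flatMap (fun p => c :: p) = t := by
          simpa using ih
        simp [this]

theorem mySplit_tail_flatMap (c : Char) (s : List Char) (hmem : c ∈ s) :
    (mySplit c s).tail.flatMap (fun p => c :: p) = s.dropWhile (· != c) := by
  induction s with
  | nil => cases hmem
  | cons x t ih =>
    by_cases hx : x = c
    · subst hx
      rw [show mySplit x (x :: t) = [] :: mySplit x t from by simp [mySplit]]
      simp only [List.tail_cons]
      rw [mySplit_flatMap x t, List.dropWhile_cons, if_neg (by simp)]
    · have hmt : c ∈ t := by
        cases hmem with
        | head => exact absurd rfl hx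
        | tail _ h => exact h
      cases hm : mySplit c t with
      | nil => exact absurd hm (mySplit_ne_nil c t)
      | cons a m =>
        simp only [mySplit, if_neg hx, hm, List.modifyHead, List.tail_cons]
        rw [hm] at ih
        simp only [List.tail_cons] at ih
        rw [List.dropWhile_cons, if_pos (by simp [hx])]
        exact ih hmt

-- the enumerate-foldl over indices ≥ 1 never fires the num == 0 branch
theorem enum_foldl_tail (ps : List (List Char)) (start : Int) (hs : 1 ≤ start)
    (acc : List Char) :
    (PySem.List.enumerate ps start).foldl
      (fun left (p : Int × List Char) =>
        left ++ (if p.1 == 0 then '[' :: '\'' :: p.2 ++ ['\'', ']'] else p.2) ++ ['[']) acc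
      = acc ++ ps.flatMap (fun p => p ++ ['[']) := by
  induction ps generalizing start acc with
  | nil => simp [PySem.List.enumerate]
  | cons a m ih =>
    rw [PySem.List.enumerate_cons]
    simp only [List.foldl_cons]
    rw [ih (start + 1) (by omega)]
    have : (start == 0) = false := by simp; omega
    simp [this]

theorem flatMap_bracket (ps : List (List Char)) :
    '[' :: ps.flatMap (fun p => p ++ ['[']) = ps.flatMap (fun p => '[' :: p) ++ ['['] := by
  induction ps with
  | nil => simp
  | cons a m ih =>
    simp only [List.flatMap_cons, List.cons_append, List.append_assoc] at *
    simp [ih]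

-- per-segment: A's branchy rebuild equals B's partition formula
theorem seg_eq (args : List Char) :
    (if PySem.Chars.isIn ['['] args then
      PySem.Chars.slice ((PySem.List.enumerate (PySem.Chars.splitOn args ['[']) 0).foldl
        (fun left_string p =>
          let val := if p.1 == 0 then '[' :: '\'' :: p.2 ++ ['\'', ']'] else p.2
          left_string ++ val ++ ['[']) []) none (some (-1))
    else '[' :: '\'' :: args ++ ['\'', ']'])
    = ('[' :: '\'' :: args.takeWhile (· != '[') ++ ['\'', ']']) ++ args.dropWhile (· != '[') := by
  by_cases hmem : '[' ∈ args
  · have hin : PySem.Chars.isIn ['['] args = true := by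
      rw [PySem.Chars.isIn_iff_infix]; exact (List.singleton_infix_iff '[' args).mpr hmem
    rw [if_pos hin, splitOn_single]
    cases hm : mySplit '[' args with
    | nil => exact absurd hm (mySplit_ne_nil _ _)
    | cons p0 ps =>
      rw [PySem.List.enumerate_cons]
      simp only [List.foldl_cons]
      have h0 : ((0 : Int) == 0) = true := by decide
      simp only [h0, if_true]
      rw [show (0:Int) + 1 = 1 from rfl]
      rw [enum_foldl_tail ps 1 (by omega)]
      have hslice : ∀ xs : List Char, PySem.Chars.slice xs none (some (-1)) = xs.dropLast := by
        intro xs; simp [PySem.Chars.slice_eq_listSlice, PySem.List.slice_to_neg_one]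
      rw [hslice]
      have hhead : p0 = args.takeWhile (· != '[') := by
        have := mySplit_headD '[' args; rw [hm] at this; simpa using this
      have htail : ps.flatMap (fun p => '[' :: p) = args.dropWhile (· != '[') := by
        have := mySplit_tail_flatMap '[' args hmem; rw [hm] at this; simpa using this
      rw [← hhead, ← htail]
      calc (List.nil ++ ('[' :: '\'' :: p0 ++ ['\'', ']']) ++ ['['] ++ ps.flatMap (fun p => p ++ ['['])).dropLast
          = (('[' :: '\'' :: p0 ++ ['\'', ']']) ++ ('[' :: ps.flatMap (fun p => p ++ ['[']))).dropLast := by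
            simp [List.append_assoc]
        _ = (('[' :: '\'' :: p0 ++ ['\'', ']']) ++ (ps.flatMap (fun p => '[' :: p) ++ ['['])).dropLast := by
            rw [flatMap_bracket]
        _ = ('[' :: '\'' :: p0 ++ ['\'', ']']) ++ ps.flatMap (fun p => '[' :: p) := by
            rw [← List.append_assoc, List.dropLast_concat]
  · have hin : PySem.Chars.isIn ['['] args = false := by
      rw [← Bool.not_eq_true, PySem.Chars.isIn_iff_infix]
      exact fun h => hmem ((List.singleton_infix_iff '[' args).mp h)
    rw [if_neg (by simp [hin])]
    have ht : args.takeWhile (· != '[') = args := by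
      rw [List.takeWhile_eq_self_iff]
      intro x hx
      simp only [bne_iff_ne, ne_eq]
      exact fun he => hmem (by rwa [he] at hx)
    have hd : args.dropWhile (· != '[') = [] := by
      rw [List.dropWhile_eq_nil_iff]
      intro x hx
      simp only [bne_iff_ne, ne_eq]
      exact fun he => hmem (by rwa [he] at hx)
    simp [ht, hd]

theorem foldl_AB (l : List (List Char)) (acc init : List Char) :
    init ++ l.foldl (fun parse_string args =>
      if PySem.Chars.isIn ['['] args then
        parse_string ++ PySem.Chars.slice ((PySem.List.enumerate (PySem.Chars.splitOn args ['[']) 0).foldl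
          (fun left_string p =>
            left_string ++ (if p.1 == 0 then '[' :: '\'' :: p.2 ++ ['\'', ']'] else p.2) ++ ['[']) []) none (some (-1))
      else parse_string ++ ('[' :: '\'' :: args ++ ['\'', ']'])) acc
    = l.foldl (fun acc seg =>
        acc ++ (('[' :: '\'' :: seg.takeWhile (· != '[') ++ ['\'', ']']) ++ seg.dropWhile (· != '['))) (init ++ acc) := by
  induction l generalizing acc init with
  | nil => simp
  | cons a m ih =>
    simp only [List.foldl_cons]
    rw [ih]
    congr 1
    rw [← seg_eq a]
    split_ifs <;> simp [List.append_assoc]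

-- ===== VERDICT (by name: the statement is the Claim_ definition above) =====
theorem parse_output_parameters_spec : Claim_equal_parse_output_parameters := by
  intro params _
  unfold Spec_parse_output_parameters parse_output_parameters parse_output_parameters_alt
  simp only
  rw [foldl_AB ((PySem.Chars.splitOn params.toList ['.']).tail) []
        (PySem.Chars.lower ((PySem.Chars.splitOn params.toList ['.']).headD [])),
      List.append_nil]
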